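-- pv_equiv track=rewrite | github.com/loning/mbook-binary | src/binaryuniverse/tests/test_T27_1.py | enforce_no_consecutive_ones
-- ===== SOURCE A (Python) =====
-- from typing import List, Dict, Tuple, Any, Optional
--
-- def enforce_no_consecutive_ones(encoding: List[int]) -> List[int]:
--     """
--     使用Fibonacci恒等式强制执行无11约束
--     恒等式：F_n + F_{n+1} = F_{n+2}
--     """
--     result = encoding.copy()
--     changed = True
--
--     while changed:
--         changed = False
--         for i in range(len(result) - 1):
--             if result[i] == 1 and result[i + 1] == 1:
--                 # 应用恒等式 F_i + F_{i+1} = F_{i+2}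
--                 result[i] = 0
--                 result[i + 1] = 0
--                 if i + 2 < len(result):
--                     result[i + 2] = 1
--                 changed = True
--                 break
--
--     return result
-- ===== SOURCE B (Python) =====
-- def enforce_no_consecutive_ones(encoding):
--     """One left-to-right pass with in-place Fibonacci carry (F_i + F_{i+1} = F_{i+2}).
--     A collapsed pair can only create a new 1-1 pair at i+2 or later, so no rescan is
--     needed; list.index jumps straight to the next 1."""
--     result = encoding.copy()
--     n = len(result)
--     i = 0
--     while True:
--         try:
--             i = result.index(1, i)
--         except ValueError:
--             break
--         if i + 1 >= n:
--             break
--         if result[i + 1] == 1: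
--             result[i] = 0
--             result[i + 1] = 0
--             if i + 2 < n:
--                 result[i + 2] = 1
--             i += 2
--         else:
--             i += 1
--     return result
-- ===== Notes on version B (the rewrite author's own statement) =====
-- stated objective: alternative
-- what changed: A rescans the whole list from index 0 after every collapsed 1-1 pair; B makes a single left-to-right pass with an in-place carry, using list.index to jump to the next 1, valid because a collapse can only create a new pair at or after i+2.
import Mathlib
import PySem

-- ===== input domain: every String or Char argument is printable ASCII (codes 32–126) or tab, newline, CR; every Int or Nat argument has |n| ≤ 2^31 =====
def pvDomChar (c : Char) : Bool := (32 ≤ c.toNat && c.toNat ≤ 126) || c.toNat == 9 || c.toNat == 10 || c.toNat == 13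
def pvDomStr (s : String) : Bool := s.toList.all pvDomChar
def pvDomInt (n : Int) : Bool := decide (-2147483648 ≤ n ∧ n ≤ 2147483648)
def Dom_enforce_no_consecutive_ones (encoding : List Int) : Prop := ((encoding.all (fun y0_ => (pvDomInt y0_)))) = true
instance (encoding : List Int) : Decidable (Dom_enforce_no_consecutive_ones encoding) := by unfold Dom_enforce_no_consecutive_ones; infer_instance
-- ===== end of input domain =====

-- B makes one left-to-right pass with an in-place carry, jumping to the next 1 with
-- list.index, where A rescans from index 0 after every collapsed pair. Equivalence is exact;
-- both functions mutate only a local copy of the argument.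

-- ===== PORT A =====
-- the body of A's `if`: result[i]=0; result[i+1]=0; if i+2<len: result[i+2]=1
-- (shared verbatim by both Pythons, so shared here)
def pvPairStep (r : List Int) (i : Nat) : List Int :=
  let r1 := (r.set i 0).set (i+1) 0
  if i + 2 < r1.length then r1.set (i+2) 1 else r1

-- A's inner `for i in range(len(result)-1)` with `break`: index of the first 1-1 pair
-- from j (fuel-structured scan; fuel r.length+1 always suffices, see pvFindPair_unfold)
def pvFindPairF : Nat → List Int → Nat → Option Nat
  | 0, _, _ => none
  | d+1, r, j =>
    if j + 1 < r.length then
      if r.getD j 0 = 1 ∧ r.getD (j+1) 0 = 1 then some j else pvFindPairF d r (j+1)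
    else none

def pvFindPair (r : List Int) (j : Nat) : Option Nat := pvFindPairF (r.length + 1) r j

-- number of entries equal to 1: each collapse removes at least one of them, so
-- pvCountOnes r + 1 rounds of A's `while changed` loop always suffice
def pvCountOnes : List Int → Nat
  | [] => 0
  | x :: xs => (if x = 1 then 1 else 0) + pvCountOnes xs

-- A's `while changed` loop: find the first 1-1 pair, collapse it, rescan from the start
def pvLoopAF : Nat → List Int → List Int
  | 0, r => r
  | n+1, r =>
    match pvFindPair r 0 with
    | none => r
    | some i => pvLoopAF n (pvPairStep r i)

def enforce_no_consecutive_ones (encoding : List Int) : List Int :=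
  pvLoopAF (pvCountOnes encoding + 1) encoding

-- ===== PORT B =====
-- B's `result.index(1, i)`: position of the first 1 at or after i (none = ValueError);
-- fuel-structured scan, fuel r.length+1 always suffices (see pvFindOne_unfold)
def pvFindOneF : Nat → List Int → Nat → Option Nat
  | 0, _, _ => none
  | d+1, r, i =>
    if i < r.length then
      if r.getD i 0 = 1 then some i else pvFindOneF d r (i+1)
    else none

def pvFindOne (r : List Int) (i : Nat) : Option Nat := pvFindOneF (r.length + 1) r i

-- B's `while True` pass: jump to the next 1, collapse the pair if its right neighbour
-- is 1 and continue at i+2, otherwise continue at i+1; the cursor moves right every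
-- round, so fuel r.length+1 always suffices
def pvAltGoF : Nat → List Int → Nat → List Int
  | 0, r, _ => r
  | d+1, r, i =>
    match pvFindOne r i with
    | none => r
    | some j =>
      if j + 1 < r.length then
        if r.getD (j+1) 0 = 1 then pvAltGoF d (pvPairStep r j) (j+2)
        else pvAltGoF d r (j+1)
      else r

def enforce_no_consecutive_ones_alt (encoding : List Int) : List Int :=
  pvAltGoF (encoding.length + 1) encoding 0

-- ===== PRECONDITION & SPEC =====
def Spec_enforce_no_consecutive_ones (encoding : List Int) (out : List Int) : Prop := out = enforce_no_consecutive_ones_alt encoding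
instance (encoding : List Int) (out : List Int) : Decidable (Spec_enforce_no_consecutive_ones encoding out) := by unfold Spec_enforce_no_consecutive_ones; infer_instance

-- ===== CLAIM (what is proved, stated in full; the proofs are below) =====
def Claim_equal_enforce_no_consecutive_ones : Prop := ∀ (encoding : List Int), Dom_enforce_no_consecutive_ones encoding → Spec_enforce_no_consecutive_ones encoding (enforce_no_consecutive_ones encoding)

-- ===== LEMMAS AND PROOFS =====

theorem pvGetD_set_ne (l : List Int) (i j : Nat) (a : Int) (h : i ≠ j) :
    (l.set i a).getD j 0 = l.getD j 0 := by
  simp [List.getD_eq_getElem?_getD, List.getElem?_set_ne h]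

theorem pvGetD_set_self (l : List Int) (i : Nat) (a : Int) (h : i < l.length) :
    (l.set i a).getD i 0 = a := by
  simp [List.getD_eq_getElem?_getD, h]

theorem pvGetD_of_ge (r : List Int) (k : Nat) (h : r.length ≤ k) : r.getD k 0 = 0 := by
  simp [List.getD_eq_getElem?_getD, List.getElem?_eq_none h]

theorem pvPairStep_length (r : List Int) (i : Nat) : (pvPairStep r i).length = r.length := by
  simp only [pvPairStep]; split <;> simp

-- any fuel covering the remaining scan distance gives the same scan result
theorem pvFindPairF_irrel : ∀ (d d' : Nat) (r : List Int) (j : Nat),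
    r.length - j ≤ d → r.length - j ≤ d' → pvFindPairF d r j = pvFindPairF d' r j := by
  intro d
  induction d with
  | zero =>
      intro d' r j hd _
      cases d' with
      | zero => rfl
      | succ d' => rw [pvFindPairF, pvFindPairF, if_neg (by omega)]
  | succ d ih =>
      intro d' r j hd hd'
      cases d' with
      | zero => rw [pvFindPairF, pvFindPairF, if_neg (by omega)]
      | succ d' =>
          rw [pvFindPairF, pvFindPairF]
          by_cases hl : j + 1 < r.length
          · rw [if_pos hl, if_pos hl]
            by_cases hp : r.getD j 0 = 1 ∧ r.getD (j+1) 0 = 1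
            · rw [if_pos hp, if_pos hp]
            · rw [if_neg hp, if_neg hp, ih d' r (j+1) (by omega) (by omega)]
          · rw [if_neg hl, if_neg hl]

theorem pvFindPair_unfold (r : List Int) (j : Nat) :
    pvFindPair r j =
      if j + 1 < r.length then
        if r.getD j 0 = 1 ∧ r.getD (j+1) 0 = 1 then some j else pvFindPair r (j+1)
      else none := by
  show pvFindPairF (r.length + 1) r j = _
  rw [pvFindPairF]
  by_cases hl : j + 1 < r.length
  · rw [if_pos hl, if_pos hl]
    by_cases hp : r.getD j 0 = 1 ∧ r.getD (j+1) 0 = 1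
    · rw [if_pos hp, if_pos hp]
    · rw [if_neg hp, if_neg hp]
      exact pvFindPairF_irrel r.length (r.length + 1) r (j+1) (by omega) (by omega)
  · rw [if_neg hl, if_neg hl]

-- if there is no pair at j, the scan from j equals the scan from j+1
theorem pvFindPair_succ (r : List Int) (j : Nat)
    (h : ¬ (r.getD j 0 = 1 ∧ r.getD (j+1) 0 = 1)) :
    pvFindPair r j = pvFindPair r (j+1) := by
  rw [pvFindPair_unfold]
  by_cases hl : j + 1 < r.length
  · rw [if_pos hl, if_neg h]
  · rw [if_neg hl, pvFindPair_unfold, if_neg (by omega)]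

theorem pvFindPair_skip (r : List Int) : ∀ (i : Nat),
    (∀ k, k < i → ¬ (r.getD k 0 = 1 ∧ r.getD (k+1) 0 = 1)) →
    pvFindPair r 0 = pvFindPair r i := by
  intro i
  induction i with
  | zero => intro _; rfl
  | succ i ih =>
      intro h
      rw [ih (fun k hk => h k (by omega)), pvFindPair_succ r i (h i (by omega))]

theorem pvFindPair_none_of_ge (r : List Int) (j : Nat) (h : ¬ j + 1 < r.length) :
    pvFindPair r j = none := by
  rw [pvFindPair_unfold, if_neg h]

theorem pvFindPair_none_of (r : List Int) : ∀ (d j : Nat), r.length - j ≤ d →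
    (∀ k, j ≤ k → r.getD k 0 ≠ 1) → pvFindPair r j = none := by
  intro d
  induction d with
  | zero =>
      intro j hd _
      rw [pvFindPair_unfold, if_neg (by omega)]
  | succ d ih =>
      intro j hd hno
      rw [pvFindPair_unfold]
      split
      · rw [if_neg (fun hp => hno j le_rfl hp.1)]
        exact ih (j+1) (by omega) (fun k hk => hno k (by omega))
      · rfl

-- the same two lemmas for B's scan for the next 1
theorem pvFindOneF_irrel : ∀ (d d' : Nat) (r : List Int) (i : Nat),
    r.length - i ≤ d → r.length - i ≤ d' → pvFindOneF d r i = pvFindOneF d' r i := by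
  intro d
  induction d with
  | zero =>
      intro d' r i hd _
      cases d' with
      | zero => rfl
      | succ d' => rw [pvFindOneF, pvFindOneF, if_neg (by omega)]
  | succ d ih =>
      intro d' r i hd hd'
      cases d' with
      | zero => rw [pvFindOneF, pvFindOneF, if_neg (by omega)]
      | succ d' =>
          rw [pvFindOneF, pvFindOneF]
          by_cases hl : i < r.length
          · rw [if_pos hl, if_pos hl]
            by_cases hp : r.getD i 0 = 1
            · rw [if_pos hp, if_pos hp]
            · rw [if_neg hp, if_neg hp, ih d' r (i+1) (by omega) (by omega)]
          · rw [if_neg hl, if_neg hl]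

theorem pvFindOne_unfold (r : List Int) (i : Nat) :
    pvFindOne r i =
      if i < r.length then
        if r.getD i 0 = 1 then some i else pvFindOne r (i+1)
      else none := by
  show pvFindOneF (r.length + 1) r i = _
  rw [pvFindOneF]
  by_cases hl : i < r.length
  · rw [if_pos hl, if_pos hl]
    by_cases hp : r.getD i 0 = 1
    · rw [if_pos hp, if_pos hp]
    · rw [if_neg hp, if_neg hp]
      exact pvFindOneF_irrel r.length (r.length + 1) r (i+1) (by omega) (by omega)
  · rw [if_neg hl, if_neg hl]

theorem pvFindOne_props (r : List Int) : ∀ (d j i : Nat), r.length - j ≤ d →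
    pvFindOne r j = some i →
    j ≤ i ∧ i < r.length ∧ r.getD i 0 = 1 ∧ (∀ k, j ≤ k → k < i → r.getD k 0 ≠ 1) := by
  intro d
  induction d with
  | zero =>
      intro j i hd h
      rw [pvFindOne_unfold, if_neg (by omega)] at h
      exact absurd h (by simp)
  | succ d ih =>
      intro j i hd h
      rw [pvFindOne_unfold] at h
      split at h
      · split at h
        · rename_i hl hp
          obtain rfl : j = i := by simpa using h
          exact ⟨le_rfl, hl, hp, fun k hk1 hk2 => by omega⟩
        · rename_i hl hp
          obtain ⟨h1, h2, h3, h4⟩ := ih (j+1) i (by omega) h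
          refine ⟨by omega, h2, h3, fun k hk1 hk2 => ?_⟩
          rcases Nat.eq_or_lt_of_le hk1 with rfl | hk
          · exact hp
          · exact h4 k hk hk2
      · exact absurd h (by simp)

theorem pvFindOne_none (r : List Int) : ∀ (d j : Nat), r.length - j ≤ d →
    pvFindOne r j = none → ∀ k, j ≤ k → r.getD k 0 ≠ 1 := by
  intro d
  induction d with
  | zero =>
      intro j hd _ k hk
      rw [pvGetD_of_ge r k (by omega)]; norm_num
  | succ d ih =>
      intro j hd h k hk
      rw [pvFindOne_unfold] at h
      split at h
      · split at h
        · exact absurd h (by simp)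
        · rename_i hl hp
          rcases Nat.eq_or_lt_of_le hk with rfl | hk'
          · exact hp
          · exact ih (j+1) (by omega) h k hk'
      · rename_i hl
        rw [pvGetD_of_ge r k (by omega)]; norm_num

-- how a collapse changes the count of ones
theorem pvCountOnes_set (l : List Int) : ∀ (i : Nat) (a : Int), i < l.length →
    pvCountOnes (l.set i a) + (if l.getD i 0 = 1 then 1 else 0)
      = pvCountOnes l + (if a = 1 then 1 else 0) := by
  induction l with
  | nil => intro i a h; simp at h
  | cons x xs ih =>
      intro i a h
      cases i with
      | zero => simp [pvCountOnes, List.getD]; omega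
      | succ i =>
          simp only [List.set, pvCountOnes, List.getD_cons_succ, List.length_cons] at *
          have := ih i a (by omega)
          omega

theorem pvCountOnes_pairStep_lt (r : List Int) (i : Nat) (h1 : i + 1 < r.length)
    (hi : r.getD i 0 = 1) (hj : r.getD (i+1) 0 = 1) :
    pvCountOnes (pvPairStep r i) < pvCountOnes r := by
  have e1 := pvCountOnes_set r i 0 (by omega)
  rw [hi] at e1
  have g1 : (r.set i 0).getD (i+1) 0 = 1 := by rw [pvGetD_set_ne r i (i+1) 0 (by omega)]; exact hj
  have e2 := pvCountOnes_set (r.set i 0) (i+1) 0 (by simp; omega)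
  rw [g1] at e2
  norm_num at e1 e2
  simp only [pvPairStep]
  split
  · rename_i h2
    have e3 := pvCountOnes_set ((r.set i 0).set (i+1) 0) (i+2) 1 (by simpa using h2)
    norm_num at e3
    split at e3 <;> omega
  · omega

-- entries of pvPairStep r i
theorem pvPairStep_getD_lt (r : List Int) (i k : Nat) (hk : k < i) :
    (pvPairStep r i).getD k 0 = r.getD k 0 := by
  simp only [pvPairStep]
  split
  · rw [pvGetD_set_ne _ _ _ _ (by omega : i + 2 ≠ k),
      pvGetD_set_ne _ _ _ _ (by omega : i + 1 ≠ k),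
      pvGetD_set_ne _ _ _ _ (by omega : i ≠ k)]
  · rw [pvGetD_set_ne _ _ _ _ (by omega : i + 1 ≠ k),
      pvGetD_set_ne _ _ _ _ (by omega : i ≠ k)]

theorem pvPairStep_getD_i (r : List Int) (i : Nat) (h : i < r.length) :
    (pvPairStep r i).getD i 0 = 0 := by
  simp only [pvPairStep]
  split
  · rw [pvGetD_set_ne _ _ _ _ (by omega : i + 2 ≠ i),
      pvGetD_set_ne _ _ _ _ (by omega : i + 1 ≠ i),
      pvGetD_set_self _ _ _ h]
  · rw [pvGetD_set_ne _ _ _ _ (by omega : i + 1 ≠ i),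
      pvGetD_set_self _ _ _ h]

theorem pvPairStep_getD_i1 (r : List Int) (i : Nat) (h : i + 1 < r.length) :
    (pvPairStep r i).getD (i+1) 0 = 0 := by
  have hs : i + 1 < ((r.set i 0)).length := by simpa using h
  simp only [pvPairStep]
  split
  · rw [pvGetD_set_ne _ _ _ _ (by omega : i + 2 ≠ i + 1),
      pvGetD_set_self _ _ _ hs]
  · rw [pvGetD_set_self _ _ _ hs]

-- one-step unfoldings of the two loops
theorem pvLoopAF_succ_none (n : Nat) (r : List Int) (h : pvFindPair r 0 = none) :
    pvLoopAF (n+1) r = r := by rw [pvLoopAF, h]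

theorem pvLoopAF_succ_some (n : Nat) (r : List Int) (i : Nat)
    (h : pvFindPair r 0 = some i) :
    pvLoopAF (n+1) r = pvLoopAF n (pvPairStep r i) := by rw [pvLoopAF, h]

theorem pvAltGoF_succ_none (m : Nat) (r : List Int) (i : Nat)
    (h : pvFindOne r i = none) : pvAltGoF (m+1) r i = r := by rw [pvAltGoF, h]

theorem pvAltGoF_succ_some (m : Nat) (r : List Int) (i j : Nat)
    (h : pvFindOne r i = some j) :
    pvAltGoF (m+1) r i =
      if j + 1 < r.length then
        if r.getD (j+1) 0 = 1 then pvAltGoF m (pvPairStep r j) (j+2)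
        else pvAltGoF m r (j+1)
      else r := by rw [pvAltGoF, h]

-- main invariant: if there is no 1-1 pair strictly before position i,
-- B's skip-to-the-next-1 pass from i computes exactly what A's restart loop computes
-- (n bounds the remaining collapses, m the remaining cursor distance)
theorem pvMain : ∀ (n m : Nat) (r : List Int) (i : Nat), pvCountOnes r < n →
    r.length - i ≤ m →
    (∀ k, k < i → ¬ (r.getD k 0 = 1 ∧ r.getD (k+1) 0 = 1)) →
    pvAltGoF m r i = pvLoopAF n r := by
  intro n
  induction n with
  | zero =>
      intro m r i hc hm hnp
      exact absurd hc (by omega)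
  | succ n ihn =>
      intro m
      induction m with
      | zero =>
          intro r i hc hm hnp
          rw [pvAltGoF, pvLoopAF_succ_none n r
            ((pvFindPair_skip r i hnp).trans (pvFindPair_none_of_ge r i (by omega)))]
      | succ m ihm =>
          intro r i hc hm hnp
          cases hfo : pvFindOne r i with
          | none =>
              have hno := pvFindOne_none r r.length i (by omega) hfo
              rw [pvAltGoF_succ_none m r i hfo, pvLoopAF_succ_none n r
                ((pvFindPair_skip r i hnp).trans
                  (pvFindPair_none_of r r.length i (by omega) hno))]
          | some j =>
              obtain ⟨hij, hjl, hj1, hmin⟩ := pvFindOne_props r r.length i j (by omega) hfo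
              have hnp2 : ∀ k, k < j → ¬ (r.getD k 0 = 1 ∧ r.getD (k+1) 0 = 1) := by
                intro k hk hpk
                rcases Nat.lt_or_ge k i with h | h
                · exact hnp k h hpk
                · exact hmin k h hk hpk.1
              rw [pvAltGoF_succ_some m r i j hfo]
              by_cases hl : j + 1 < r.length
              · rw [if_pos hl]
                by_cases hp : r.getD (j+1) 0 = 1
                · rw [if_pos hp]
                  have hfind : pvFindPair r 0 = some j := by
                    rw [pvFindPair_skip r j hnp2, pvFindPair_unfold, if_pos hl,
                      if_pos ⟨hj1, hp⟩]
                  rw [pvLoopAF_succ_some n r j hfind]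
                  have hlt := pvCountOnes_pairStep_lt r j hl hj1 hp
                  refine ihn m (pvPairStep r j) (j+2) (by omega)
                    (by rw [pvPairStep_length]; omega) ?_
                  intro k hk hpk
                  rcases Nat.lt_trichotomy k j with h | h | h
                  · rcases Nat.lt_trichotomy (k+1) j with h2 | h2 | h2
                    · have h1 : r.getD k 0 = 1 := by
                        rw [← pvPairStep_getD_lt r j k h]; exact hpk.1
                      have h2' : r.getD (k+1) 0 = 1 := by
                        rw [← pvPairStep_getD_lt r j (k+1) h2]; exact hpk.2
                      exact hnp2 k h ⟨h1, h2'⟩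
                    · rw [h2, pvPairStep_getD_i r j (by omega)] at hpk
                      exact absurd hpk.2 (by norm_num)
                    · omega
                  · rw [h, pvPairStep_getD_i r j (by omega)] at hpk
                    exact absurd hpk.1 (by norm_num)
                  · have h3 : k = j + 1 := by omega
                    rw [h3, pvPairStep_getD_i1 r j hl] at hpk
                    exact absurd hpk.1 (by norm_num)
                · rw [if_neg hp]
                  refine ihm r (j+1) hc (by omega) ?_
                  intro k hk
                  rcases Nat.lt_trichotomy k j with h | h | h
                  · exact hnp2 k h
                  · rw [h]; exact fun hpk => hp hpk.2
                  · omega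
              · rw [if_neg hl]
                rw [pvLoopAF_succ_none n r
                  ((pvFindPair_skip r j hnp2).trans (pvFindPair_none_of_ge r j hl))]

-- ===== VERDICT (by name: the statement is the Claim_ definition above) =====
theorem enforce_no_consecutive_ones_spec : Claim_equal_enforce_no_consecutive_ones := by
  intro encoding _
  unfold Spec_enforce_no_consecutive_ones enforce_no_consecutive_ones enforce_no_consecutive_ones_alt
  exact (pvMain (pvCountOnes encoding + 1) (encoding.length + 1) encoding 0 (by omega) (by omega)
    (fun k hk => absurd hk (by omega))).symm
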